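-- pv_equiv track=rewrite | github.com/LuckyIntegral/AOC_2024 | 2015/day1/main.py | silver
-- ===== SOURCE A (Python) =====
-- def parse_data(content: str) -> any:
--     '''Parses the data'''
--     return content.splitlines()
--
-- def silver(content: str) -> int:
--     '''Solves the silver problem'''
--     data = parse_data(content)
--     level = 0
--     for char in data[0]:
--         if char == '(':
--             level += 1
--         else:
--             level -= 1
--     return level
-- ===== SOURCE B (Python) =====
-- def parse_data(content: str) -> any:
--     '''Parses the data'''
--     return content.splitlines()
--
-- def _level(s: str) -> int:
--     '''Divide and conquer: each char contributes +1 ('(') or -1 (anything else),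
--     and the total is additive over concatenation.'''
--     if len(s) <= 1:
--         if not s:
--             return 0
--         return 1 if s[0] == '(' else -1
--     mid = len(s) // 2
--     return _level(s[:mid]) + _level(s[mid:])
--
-- def silver(content: str) -> int:
--     '''Solves the silver problem'''
--     return _level(parse_data(content)[0])
-- ===== Notes on version B (the rewrite author's own statement) =====
-- stated objective: alternative
-- what changed: Replaces A's left-to-right accumulator loop with a divide-and-conquer recursion that splits the first line in half and adds the two halves' levels (correct because each character's +/-1 contribution is independent, so the level is additive over concatenation).
import Mathlib
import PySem

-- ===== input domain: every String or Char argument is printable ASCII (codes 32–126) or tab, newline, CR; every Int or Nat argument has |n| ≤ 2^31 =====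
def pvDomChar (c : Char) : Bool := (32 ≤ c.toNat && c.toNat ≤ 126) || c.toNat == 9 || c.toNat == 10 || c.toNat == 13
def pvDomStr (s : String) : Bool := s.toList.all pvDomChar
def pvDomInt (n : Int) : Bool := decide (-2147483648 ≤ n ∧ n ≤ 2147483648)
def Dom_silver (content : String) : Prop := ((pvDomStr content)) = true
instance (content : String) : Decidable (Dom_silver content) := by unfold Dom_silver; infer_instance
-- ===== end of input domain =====

-- B replaces A's accumulator loop with a divide-and-conquer recursion on halves of the line.

-- ===== PORT A =====
def silver (content : String) : Int :=
  match PySem.List.pyGet? (PySem.Str.splitlines content) 0 with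
  | some line => line.toList.foldl (fun level ch => if ch = '(' then level + 1 else level - 1) 0
  | none => 0   -- unreachable under Pre_silver (Python raises IndexError)

-- ===== PORT B =====
-- _level from Source B, on the line's characters (s[:mid]/s[mid:] = take/drop)
def levelDC (l : List Char) : Int :=
  if h : l.length ≤ 1 then
    match l with
    | [] => 0
    | c :: _ => if c = '(' then 1 else -1
  else
    levelDC (l.take (l.length / 2)) + levelDC (l.drop (l.length / 2))
termination_by l.length
decreasing_by
  · simp only [List.length_take]; omega
  · simp only [List.length_drop]; omega

def silver_alt (content : String) : Int :=
  match PySem.List.pyGet? (PySem.Str.splitlines content) 0 with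
  | some line => levelDC line.toList
  | none => 0   -- unreachable under Pre_silver (Python raises IndexError)

-- ===== PRECONDITION & SPEC =====
-- Pre_ excludes exactly the inputs with no first line (content = ""), on which A (and B) raise IndexError.
def Pre_silver (content : String) : Prop := PySem.Str.splitlines content ≠ []
instance (content : String) : Decidable (Pre_silver content) := by unfold Pre_silver; infer_instance
def pvWitness_silver : String := "(()abc"
def Spec_silver (content : String) (out : Int) : Prop := out = silver_alt content
instance (content : String) (out : Int) : Decidable (Spec_silver content out) := by unfold Spec_silver; infer_instance

-- ===== CLAIM (what is proved, stated in full; the proofs are below) =====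
def Claim_equal_silver : Prop := ∀ (content : String), Dom_silver content → Pre_silver content → Spec_silver content (silver content)

-- ===== LEMMAS AND PROOFS =====

def chVal (c : Char) : Int := if c = '(' then 1 else -1

-- B's divide-and-conquer equals the per-character sum (additivity over take ++ drop).
theorem levelDC_eq_sum (l : List Char) : levelDC l = (l.map chVal).sum := by
  induction l using levelDC.induct with
  | case1 _ _ => simp [levelDC]
  | case2 tail h _ =>
    obtain rfl : tail = [] := by cases tail <;> simp_all
    simp [levelDC, chVal]
  | case3 c tail h hc _ =>
    obtain rfl : tail = [] := by cases tail <;> simp_all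
    simp [levelDC, chVal, hc]
  | case4 l h ih1 ih2 =>
    rw [levelDC, dif_neg h, ih1, ih2, ← List.sum_append, ← List.map_append,
      List.take_append_drop]

-- A's loop equals the same sum.
theorem foldl_level (l : List Char) (a : Int) :
    l.foldl (fun level ch => if ch = '(' then level + 1 else level - 1) a
      = a + (l.map chVal).sum := by
  induction l generalizing a with
  | nil => simp
  | cons hd tl ih =>
    by_cases h : hd = '(' <;> simp [h, ih, chVal] <;> ring

-- ===== VERDICT (by name: the statement is the Claim_ definition above) =====
theorem silver_spec : Claim_equal_silver := by
  intro content _ _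
  unfold Spec_silver silver silver_alt
  cases hg : PySem.List.pyGet? (PySem.Str.splitlines content) 0 with
  | none => rfl
  | some line => simp only [foldl_level, levelDC_eq_sum, zero_add]
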